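-- pv_equiv track=rewrite | github.com/langware-labs/skillit | scripts/resource_management/scan/system_profile/_collectors/transcript_collector.py | get_recent_items
-- ===== SOURCE A (Python) =====
-- def get_recent_items(
--     sessions: list,
--     projects: list,
--     plans: list,
--     todos: list,
--     limit: int = 20,
-- ) -> list[dict]:
--     """Get most recently modified items across all types.
--
--     Returns items matching SystemProfileItem schema with:
--     - system_id: Unique identifier
--     - item_type: Type discriminator
--     - name: Display name
--     - scope: Location scope
--     - modified_at: Last modified timestamp
--     - path: Full path to item
--     """
--     items = []
--
--     for session in sessions[:10]:
--         items.append(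
--             {
--                 "id": session.get("system_id", session.get("name", "")),
--                 "type": "session",
--                 "name": session.get("name", ""),
--                 "scope": session.get("scope", "user"),
--                 "modified_at": session.get("modified_at"),
--                 "path": session.get("path", ""),
--             }
--         )
--
--     for project in projects[:5]:
--         items.append(
--             {
--                 "id": project.get("system_id", project.get("name", "")),
--                 "type": "project",
--                 "name": project.get("name", ""),
--                 "scope": project.get("scope", "user"),
--                 "modified_at": project.get("modified_at"),
--                 "path": project.get("cwd", ""),
--             }
--         )
--
--     for plan in plans[:3]:
--         items.append(
--             {
--                 "id": plan.get("system_id", plan.get("name", "")),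
--                 "type": "plan",
--                 "name": plan.get("name", ""),
--                 "scope": plan.get("scope", "user"),
--                 "modified_at": plan.get("modified_at"),
--                 "path": plan.get("path", ""),
--             }
--         )
--
--     for todo in todos[:3]:
--         items.append(
--             {
--                 "id": todo.get("system_id", todo.get("name", "")),
--                 "type": "todo",
--                 "name": todo.get("name", ""),
--                 "scope": todo.get("scope", "user"),
--                 "modified_at": todo.get("modified_at"),
--                 "path": todo.get("path", ""),
--             }
--         )
--
--     items.sort(key=lambda x: x.get("modified_at") or "", reverse=True)
--     return items[:limit]
-- ===== SOURCE B (Python) =====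
-- def get_recent_items(
--     sessions: list,
--     projects: list,
--     plans: list,
--     todos: list,
--     limit: int = 20,
-- ) -> list[dict]:
--     """Online insertion-sort variant: no collect-then-sort pass.
--
--     `out` is kept ordered at all times (descending by modified_at-or-"",
--     later-collected items after earlier ones on equal keys, which matches a
--     stable descending sort of the collection order), so the final step is a
--     plain truncation.
--     """
--     out = []
--     for source, cap, type_name, path_key in (
--         (sessions, 10, "session", "path"),
--         (projects, 5, "project", "cwd"),
--         (plans, 3, "plan", "path"),
--         (todos, 3, "todo", "path"),
--     ):
--         for item in source[:cap]:
--             entry = {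
--                 "id": item.get("system_id", item.get("name", "")),
--                 "type": type_name,
--                 "name": item.get("name", ""),
--                 "scope": item.get("scope", "user"),
--                 "modified_at": item.get("modified_at"),
--                 "path": item.get(path_key, ""),
--             }
--             key = entry["modified_at"] or ""
--             i = 0
--             while i < len(out) and (out[i]["modified_at"] or "") >= key:
--                 i += 1
--             out.insert(i, entry)
--     return out[:limit]
-- ===== Notes on version B (the rewrite author's own statement) =====
-- stated objective: alternative
-- what changed: B never builds an unsorted list and never calls sort: it maintains the output ordered at all times, inserting each formatted entry at its place (linear scan, descending by modified_at-or-empty, after equal keys for stability) as it is collected, then just truncates; A collects everything with four loops and stably sorts at the end.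
import Mathlib
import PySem

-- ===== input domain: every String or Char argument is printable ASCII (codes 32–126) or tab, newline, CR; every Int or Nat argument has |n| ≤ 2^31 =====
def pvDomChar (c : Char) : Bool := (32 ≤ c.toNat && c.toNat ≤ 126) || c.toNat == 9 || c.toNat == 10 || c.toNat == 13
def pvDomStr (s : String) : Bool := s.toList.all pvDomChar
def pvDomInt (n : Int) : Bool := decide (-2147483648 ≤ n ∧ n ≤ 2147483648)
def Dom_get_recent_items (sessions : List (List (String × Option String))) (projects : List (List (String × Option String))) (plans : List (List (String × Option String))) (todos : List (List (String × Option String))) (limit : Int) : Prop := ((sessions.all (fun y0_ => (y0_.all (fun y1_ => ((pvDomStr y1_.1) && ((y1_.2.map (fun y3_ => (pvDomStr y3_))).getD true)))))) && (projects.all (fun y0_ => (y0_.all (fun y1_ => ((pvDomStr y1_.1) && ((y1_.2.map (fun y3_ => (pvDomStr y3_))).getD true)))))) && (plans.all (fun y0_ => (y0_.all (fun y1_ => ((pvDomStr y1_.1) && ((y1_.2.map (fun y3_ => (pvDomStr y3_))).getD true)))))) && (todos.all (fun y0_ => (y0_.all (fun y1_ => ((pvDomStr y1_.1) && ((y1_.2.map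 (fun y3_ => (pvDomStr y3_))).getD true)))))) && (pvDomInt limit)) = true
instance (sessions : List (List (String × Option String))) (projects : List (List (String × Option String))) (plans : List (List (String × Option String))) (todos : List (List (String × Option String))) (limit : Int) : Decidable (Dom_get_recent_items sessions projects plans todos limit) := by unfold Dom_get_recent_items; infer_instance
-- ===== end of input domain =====

-- B maintains the output list sorted (descending by modified_at-or-"", stable) by inserting each
-- formatted entry at its place as it is collected, instead of A's collect-four-lists-then-sort.

-- shared primitive: Python dict .get(k, dflt) on an association list (first match)
def pvGet (d : List (String × Option String)) (k : String) (dflt : Option String) : Option String :=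
  match d.find? (fun p => p.1 == k) with
  | some p => p.2
  | none => dflt

-- sort key used by both: x.get("modified_at") or ""  (None and "" are both falsy, so this is getD "")
def pvKey (x : List (String × Option String)) : String :=
  (pvGet x "modified_at" none).getD ""

-- ===== PORT A =====
def get_recent_items (sessions : List (List (String × Option String))) (projects : List (List (String × Option String))) (plans : List (List (String × Option String))) (todos : List (List (String × Option String))) (limit : Int) : List (List (String × Option String)) :=
  let items : List (List (String × Option String)) := []
  let items := (PySem.List.slice sessions none (some 10)).foldl (fun acc session =>
    acc ++ [[("id", pvGet session "system_id" (pvGet session "name" (some ""))),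
             ("type", some "session"),
             ("name", pvGet session "name" (some "")),
             ("scope", pvGet session "scope" (some "user")),
             ("modified_at", pvGet session "modified_at" none),
             ("path", pvGet session "path" (some ""))]]) items
  let items := (PySem.List.slice projects none (some 5)).foldl (fun acc project =>
    acc ++ [[("id", pvGet project "system_id" (pvGet project "name" (some ""))),
             ("type", some "project"),
             ("name", pvGet project "name" (some "")),
             ("scope", pvGet project "scope" (some "user")),
             ("modified_at", pvGet project "modified_at" none),
             ("path", pvGet project "cwd" (some ""))]]) items
  let items := (PySem.List.slice plans none (some 3)).foldl (fun acc plan =>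
    acc ++ [[("id", pvGet plan "system_id" (pvGet plan "name" (some ""))),
             ("type", some "plan"),
             ("name", pvGet plan "name" (some "")),
             ("scope", pvGet plan "scope" (some "user")),
             ("modified_at", pvGet plan "modified_at" none),
             ("path", pvGet plan "path" (some ""))]]) items
  let items := (PySem.List.slice todos none (some 3)).foldl (fun acc todo =>
    acc ++ [[("id", pvGet todo "system_id" (pvGet todo "name" (some ""))),
             ("type", some "todo"),
             ("name", pvGet todo "name" (some "")),
             ("scope", pvGet todo "scope" (some "user")),
             ("modified_at", pvGet todo "modified_at" none),
             ("path", pvGet todo "path" (some ""))]]) items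
  PySem.List.slice (PySem.List.sorted items pvKey true) none (some limit)

-- ===== PORT B =====
-- Source B's formatted `entry` dict
def pvEntry (item : List (String × Option String)) (type_name path_key : String) : List (String × Option String) :=
  [("id", pvGet item "system_id" (pvGet item "name" (some ""))),
   ("type", some type_name),
   ("name", pvGet item "name" (some "")),
   ("scope", pvGet item "scope" (some "user")),
   ("modified_at", pvGet item "modified_at" none),
   ("path", pvGet item path_key (some ""))]

-- Source B's while loop + out.insert(i, entry): walk past entries whose key is >= the new key,
-- place the new entry before the first strictly smaller one (so after equal keys: stable descending)
def pvInsertDesc (x : List (String × Option String)) : List (List (String × Option String)) -> List (List (String × Option String))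
  | [] => [x]
  | y :: ys => if pvKey x <= pvKey y then y :: pvInsertDesc x ys else x :: y :: ys

def get_recent_items_alt (sessions : List (List (String × Option String))) (projects : List (List (String × Option String))) (plans : List (List (String × Option String))) (todos : List (List (String × Option String))) (limit : Int) : List (List (String × Option String)) :=
  let specs : List (List (List (String × Option String)) × Int × String × String) :=
    [(sessions, 10, "session", "path"),
     (projects, 5, "project", "cwd"),
     (plans, 3, "plan", "path"),
     (todos, 3, "todo", "path")]
  let out := specs.foldl (fun out sp =>
    (PySem.List.slice sp.1 none (some sp.2.1)).foldl
      (fun out item => pvInsertDesc (pvEntry item sp.2.2.1 sp.2.2.2) out) out) []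
  PySem.List.slice out none (some limit)

-- ===== PRECONDITION & SPEC =====
def Spec_get_recent_items (sessions : List (List (String × Option String))) (projects : List (List (String × Option String))) (plans : List (List (String × Option String))) (todos : List (List (String × Option String))) (limit : Int) (out : List (List (String × Option String))) : Prop := out = get_recent_items_alt sessions projects plans todos limit
instance (sessions : List (List (String × Option String))) (projects : List (List (String × Option String))) (plans : List (List (String × Option String))) (todos : List (List (String × Option String))) (limit : Int) (out : List (List (String × Option String))) : Decidable (Spec_get_recent_items sessions projects plans todos limit out) := by unfold Spec_get_recent_items; infer_instance

-- ===== CLAIM (what is proved, stated in full; the proofs are below) =====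
def Claim_equal_get_recent_items : Prop := ∀ (sessions : List (List (String × Option String))) (projects : List (List (String × Option String))) (plans : List (List (String × Option String))) (todos : List (List (String × Option String))) (limit : Int), Dom_get_recent_items sessions projects plans todos limit → Spec_get_recent_items sessions projects plans todos limit (get_recent_items sessions projects plans todos limit)

-- ===== LEMMAS AND PROOFS =====

-- B's insertion step is exactly the insertBy step that characterises PySem's stable reverse sort
theorem pvInsertDesc_eq_insertBy (x : List (String × Option String)) (ys : List (List (String × Option String))) :
    pvInsertDesc x ys = PySem.List.insertBy (fun a b => decide (pvKey b < pvKey a)) x ys := by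
  induction ys with
  | nil => rfl
  | cons y t ih =>
      by_cases h : pvKey x <= pvKey y
      · simp [pvInsertDesc, PySem.List.insertBy, h, not_lt.mpr h, ih]
      · simp [pvInsertDesc, PySem.List.insertBy, h, lt_of_not_ge h]

-- ===== VERDICT (by name: the statement is the Claim_ definition above) =====
theorem get_recent_items_spec : Claim_equal_get_recent_items := by
  intro sessions projects plans todos limit _
  unfold Spec_get_recent_items get_recent_items get_recent_items_alt
  simp only [List.foldl_cons, List.foldl_nil,
    PySem.List.foldl_append_singleton_eq_map, List.nil_append,
    PySem.List.sorted_rev_eq_foldl_insertBy]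
  rw [show (fun (acc : List (List (String × Option String))) x =>
        PySem.List.insertBy (fun a b => decide (pvKey b < pvKey a)) x acc)
      = fun acc x => pvInsertDesc x acc from funext fun acc => funext fun x =>
        (pvInsertDesc_eq_insertBy x acc).symm]
  simp only [List.foldl_append, List.foldl_map, pvEntry]
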